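-- pv_equiv track=rewrite | github.com/boknowswiki/mytraning | lintcode/python/1368_same_number.py | sameNumber
-- ===== SOURCE A (Python) =====
-- def sameNumber(nums, k):
--     # Write your code here
--     n = len(nums)
--
--     d = {}
--
--     for i in range(n):
--         if nums[i] not in d:
--             d[nums[i]] = i
--         else:
--             diff = i - d[nums[i]]
--
--             if diff < k:
--                 return "YES"
--             d[nums[i]] = i
--
--     return "NO"
-- ===== SOURCE B (Python) =====
-- def sameNumber(nums, k):
--     # Simpler: a value repeats within distance < k iff it appears in the
--     # window of the previous k-1 elements; scan that window directly.
--     for i, x in enumerate(nums):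
--         if x in nums[max(0, i - k + 1):i]:
--             return "YES"
--     return "NO"
-- ===== Notes on version B (the rewrite author's own statement) =====
-- stated objective: simpler
-- what changed: Replaces the last-occurrence dictionary with a direct membership test of each element in the slice of the previous k-1 elements (sliding window scan instead of index bookkeeping).
import Mathlib
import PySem

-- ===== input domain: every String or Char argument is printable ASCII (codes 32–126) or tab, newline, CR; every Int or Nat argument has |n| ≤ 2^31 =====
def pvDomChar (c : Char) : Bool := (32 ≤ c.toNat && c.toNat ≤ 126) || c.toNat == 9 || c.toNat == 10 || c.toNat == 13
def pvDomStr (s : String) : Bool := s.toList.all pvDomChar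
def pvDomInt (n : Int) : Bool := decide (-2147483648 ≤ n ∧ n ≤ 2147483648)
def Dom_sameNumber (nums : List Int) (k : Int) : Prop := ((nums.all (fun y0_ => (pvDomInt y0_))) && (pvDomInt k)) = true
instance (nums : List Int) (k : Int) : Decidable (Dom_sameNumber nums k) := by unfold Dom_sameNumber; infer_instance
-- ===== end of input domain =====

-- B replaces A's last-occurrence dictionary with a direct scan of the previous k-1 elements (simpler; not faster).

-- ===== PORT A =====
-- for i in range(n) with the dict d of last occurrences; early return "YES"
def sameNumberA_go (k : Int) : List Int → Nat → PySem.Dict Int Int → String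
  | [], _, _ => "NO"
  | x :: rest, i, d =>
    match d.get? x with
    | none => sameNumberA_go k rest (i + 1) (d.insert x (i : Int))
    | some j =>
      if (i : Int) - j < k then "YES"
      else sameNumberA_go k rest (i + 1) (d.insert x (i : Int))

def sameNumber (nums : List Int) (k : Int) : String :=
  sameNumberA_go k nums 0 PySem.Dict.empty

-- ===== PORT B =====
-- for i, x in enumerate(nums): if x in nums[max(0, i-k+1):i]: return "YES"
def sameNumberB_go (nums : List Int) (k : Int) : List (Int × Int) → String
  | [] => "NO"
  | (i, x) :: rest =>
    if (PySem.List.slice nums (some (max 0 (i - k + 1))) (some i)).contains x then "YES"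
    else sameNumberB_go nums k rest

def sameNumber_alt (nums : List Int) (k : Int) : String :=
  sameNumberB_go nums k (PySem.List.enumerate nums 0)

-- ===== PRECONDITION & SPEC =====
def Spec_sameNumber (nums : List Int) (k : Int) (out : String) : Prop := out = sameNumber_alt nums k
instance (nums : List Int) (k : Int) (out : String) : Decidable (Spec_sameNumber nums k out) := by unfold Spec_sameNumber; infer_instance

-- ===== CLAIM (what is proved, stated in full; the proofs are below) =====
def Claim_equal_sameNumber : Prop := ∀ (nums : List Int) (k : Int), Dom_sameNumber nums k → Spec_sameNumber nums k (sameNumber nums k)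

-- ===== LEMMAS AND PROOFS =====

-- Invariant of A's dict after the first i elements: d maps each value to the index of
-- its LAST occurrence among nums[0..i-1] (and has no entry iff there is none).
def DictInv (nums : List Int) (i : Nat) (d : PySem.Dict Int Int) : Prop :=
  ∀ v : Int,
    (d.get? v = none → ∀ j : Nat, j < i → nums[j]? ≠ some v) ∧
    (∀ m : Int, d.get? v = some m →
      ∃ jm : Nat, (jm : Int) = m ∧ jm < i ∧ nums[jm]? = some v ∧
        ∀ j : Nat, jm < j → j < i → nums[j]? ≠ some v)

lemma dictInv_empty (nums : List Int) : DictInv nums 0 PySem.Dict.empty := by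
  intro v
  constructor
  · intro _ j hj; omega
  · intro m hm; simp [PySem.Dict.get?_empty] at hm

lemma dictInv_insert {nums : List Int} {i : Nat} {d : PySem.Dict Int Int} {x : Int}
    (hInv : DictInv nums i d) (hx : nums[i]? = some x) :
    DictInv nums (i + 1) (d.insert x (i : Int)) := by
  intro v
  by_cases hvx : v = x
  · subst hvx
    constructor
    · intro hnone; simp [PySem.Dict.get?_insert_self] at hnone
    · intro m hm
      rw [PySem.Dict.get?_insert_self] at hm
      injection hm with h
      exact ⟨i, h, by omega, hx, fun j hij hji => by omega⟩
  · constructor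
    · intro hnone j hj
      rw [PySem.Dict.get?_insert_of_ne d ((i : Int)) hvx] at hnone
      rcases Nat.lt_succ_iff_lt_or_eq.mp hj with h | h
      · exact (hInv v).1 hnone j h
      · subst h; rw [hx]
        exact fun h => hvx (Option.some.inj h).symm
    · intro m hm
      rw [PySem.Dict.get?_insert_of_ne d ((i : Int)) hvx] at hm
      obtain ⟨jm, hjm, hlt, hocc, hmax⟩ := (hInv v).2 m hm
      refine ⟨jm, hjm, by omega, hocc, ?_⟩
      intro j hij hji
      rcases Nat.lt_succ_iff_lt_or_eq.mp hji with h | h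
      · exact hmax j hij h
      · subst h; rw [hx]
        exact fun h => hvx (Option.some.inj h).symm

-- x ∈ (xs.drop a).take t ↔ some index in [a, a+t) holds x
lemma mem_drop_take_iff {xs : List Int} {a t : Nat} {x : Int} :
    x ∈ (xs.drop a).take t ↔ ∃ j : Nat, a ≤ j ∧ j < a + t ∧ xs[j]? = some x := by
  rw [List.mem_iff_getElem?]
  constructor
  · rintro ⟨n, hn⟩
    obtain ⟨hlen, -⟩ := List.getElem?_eq_some_iff.mp hn
    have hnt : n < t := by
      have := List.length_take_le t (xs.drop a)
      omega
    rw [List.getElem?_take_of_lt hnt, List.getElem?_drop] at hn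
    exact ⟨a + n, by omega, by omega, hn⟩
  · rintro ⟨j, haj, hjt, hj⟩
    refine ⟨j - a, ?_⟩
    rw [List.getElem?_take_of_lt (by omega), List.getElem?_drop,
      Nat.add_sub_cancel' haj]
    exact hj

-- A's YES-condition at index i (via the dict) coincides with B's window membership.
lemma cond_iff {nums : List Int} {k : Int} {i : Nat} {d : PySem.Dict Int Int} {x : Int}
    (hInv : DictInv nums i d) :
    (∃ m : Int, d.get? x = some m ∧ (i : Int) - m < k) ↔
      x ∈ PySem.List.slice nums (some (max 0 ((i : Int) - k + 1))) (some (i : Int)) := by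
  have ha : (0 : Int) ≤ max 0 ((i : Int) - k + 1) := le_max_left _ _
  rw [PySem.List.slice_toNat nums ha (Int.natCast_nonneg i), mem_drop_take_iff]
  have hi : ((i : Int)).toNat = i := Int.toNat_natCast i
  constructor
  · rintro ⟨m, hm, hmk⟩
    obtain ⟨jm, hjm, hlt, hocc, -⟩ := (hInv x).2 m hm
    refine ⟨jm, ?_, by omega, hocc⟩
    have h1 : max 0 ((i : Int) - k + 1) ≤ (jm : Int) := by
      rw [max_le_iff]
      exact ⟨Int.natCast_nonneg jm, by omega⟩
    omega
  · rintro ⟨j, haj, hjt, hj⟩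
    have hji : j < i := by omega
    have haj' : max 0 ((i : Int) - k + 1) ≤ (j : Int) := by
      have := Int.toNat_le.mp haj
      omega
    cases hget : d.get? x with
    | none => exact absurd hj ((hInv x).1 hget j hji)
    | some m =>
      obtain ⟨jm, hjm, hlt, hocc, hmax⟩ := (hInv x).2 m hget
      have hjle : j ≤ jm := by
        by_contra h
        exact hmax j (by omega) hji hj
      have h1 : (i : Int) - k + 1 ≤ (j : Int) := le_trans (le_max_right _ _) haj'
      exact ⟨m, rfl, by omega⟩

lemma go_eq (nums : List Int) (k : Int) :
    ∀ (rest : List Int) (i : Nat) (d : PySem.Dict Int Int),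
      nums.drop i = rest → DictInv nums i d →
      sameNumberA_go k rest i d = sameNumberB_go nums k (PySem.List.enumerate rest (i : Int)) := by
  intro rest
  induction rest with
  | nil => intro i d _ _; simp [sameNumberA_go, sameNumberB_go, PySem.List.enumerate_nil]
  | cons x rest' ih =>
    intro i d hdrop hInv
    have hx : nums[i]? = some x := by
      have h : (List.drop i nums)[0]? = some x := by rw [hdrop]; rfl
      rwa [List.getElem?_drop, Nat.add_zero] at h
    have hdrop' : nums.drop (i + 1) = rest' := by
      have h2 : nums.drop (i + 1) = (nums.drop i).drop 1 := by rw [List.drop_drop]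
      rw [h2, hdrop]; rfl
    have hcond := cond_iff (k := k) (x := x) hInv
    rw [PySem.List.enumerate_cons]
    cases hget : d.get? x with
    | none =>
      have hnot : ¬ x ∈ PySem.List.slice nums (some (max 0 ((i : Int) - k + 1))) (some (i : Int)) := by
        rw [← hcond]; rintro ⟨m, hm, -⟩; rw [hget] at hm; simp at hm
      simp only [sameNumberA_go, sameNumberB_go, hget]
      rw [if_neg (by simpa using hnot)]
      exact ih (i + 1) _ hdrop' (dictInv_insert hInv hx)
    | some m =>
      by_cases hk : (i : Int) - m < k
      · simp only [sameNumberA_go, sameNumberB_go, hget]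
        rw [if_pos hk, if_pos (by simpa using hcond.mp ⟨m, hget, hk⟩)]
      · have hnot : ¬ x ∈ PySem.List.slice nums (some (max 0 ((i : Int) - k + 1))) (some (i : Int)) := by
          rw [← hcond]; rintro ⟨m', hm', hk'⟩
          rw [hget] at hm'
          exact hk ((Option.some.inj hm') ▸ hk')
        simp only [sameNumberA_go, sameNumberB_go, hget]
        rw [if_neg hk, if_neg (by simpa using hnot)]
        exact ih (i + 1) _ hdrop' (dictInv_insert hInv hx)

-- ===== VERDICT (by name: the statement is the Claim_ definition above) =====
theorem sameNumber_spec : Claim_equal_sameNumber := by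
  intro nums k _
  unfold Spec_sameNumber sameNumber sameNumber_alt
  exact go_eq nums k nums 0 PySem.Dict.empty (by simp) (dictInv_empty nums)
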